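-- pv_equiv track=rewrite | github.com/So1itarius/CompanyChallenges | Quora-www.quora.com/mostViewedWriters/mostViewedWriters.py | Function2
-- ===== SOURCE A (Python) =====
-- def sumfunction(v, v1):
--     i = 0
--     a = len(v1)
--     while (i != len(v1)):
--         if (v[0] == v1[i][0]):
--             v1.append([v[0], v1.pop(i)[1] + v[1]])
--             return v1
--         i = i + 1
--     if len(v1) == 0 or a == len(v1):
--         v1.append(v)
--     return v1
--
-- def Function2(v, views):
--     j = 0;
--     i = 0;
--     k = 0
--     v1 = []
--     while (j != len(v)):
--         while (i != len(v[j])):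
--             while (k != len(views)):
--                 if v[j][i] == views[k][0]:
--                     sumfunction(views[k][1:], v1)
--                 k = k + 1
--             i = i + 1
--             k = 0
--         i = 0
--         j = j + 1
--     output = sorted(v1, key=lambda point: (-point[1], point[0]))
--     return output
-- ===== SOURCE B (Python) =====
-- def Function2(v, views):
--     index = {}
--     for r in views:
--         if r:
--             index.setdefault(r[0], []).append(r[1:])
--     acc = {}
--     for row in v:
--         for x in row:
--             for t in index.get(x, []):
--                 if t[0] in acc:
--                     acc[t[0]] = [t[0], acc[t[0]][1] + t[1]]
--                 else:
--                     acc[t[0]] = t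
--     return sorted(acc.values(), key=lambda p: (-p[1], p[0]))
-- ===== Notes on version B (the rewrite author's own statement) =====
-- stated objective: faster
-- what changed: Replaces the triple nested scan (every element of v times every row of views) plus a linear search-and-move in the accumulator list with a dict index of views by key and a dict accumulator keyed by writer name, sorted once at the end.
import Mathlib
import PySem

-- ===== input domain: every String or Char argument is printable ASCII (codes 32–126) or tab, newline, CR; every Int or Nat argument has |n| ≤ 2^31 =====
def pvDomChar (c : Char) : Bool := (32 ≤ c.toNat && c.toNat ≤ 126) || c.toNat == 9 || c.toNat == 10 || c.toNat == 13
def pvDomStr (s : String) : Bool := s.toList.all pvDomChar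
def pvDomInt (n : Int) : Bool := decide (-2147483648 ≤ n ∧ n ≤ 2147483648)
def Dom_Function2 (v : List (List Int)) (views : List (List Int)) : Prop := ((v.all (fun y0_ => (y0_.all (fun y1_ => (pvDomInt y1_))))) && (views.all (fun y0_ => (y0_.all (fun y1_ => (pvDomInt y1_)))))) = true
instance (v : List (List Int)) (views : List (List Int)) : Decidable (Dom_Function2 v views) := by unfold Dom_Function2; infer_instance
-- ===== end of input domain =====

-- B replaces A's triple nested scan over views plus a linear search-and-move accumulator list
-- with a dict index of views by key and a dict accumulator keyed by name, sorted once (faster).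

-- ===== PORT A =====
-- x[0] / x[1] of a row; the default 0 stands where Python would raise IndexError, which Pre_ excludes
def pvHd (e : List Int) : Int := (PySem.List.pyGet? e 0).getD 0
def pvSnd (e : List Int) : Int := (PySem.List.pyGet? e 1).getD 0

-- sumfunction: scan v1 for an entry with the same head; pop it and append the merged pair,
-- else append v at the end (the 'a == len(v1)' guard is always true when the scan found no match)
def pvSumA (t : List Int) (v1 : List (List Int)) : List (List Int) :=
  match v1 with
  | [] => [t]
  | e :: rest =>
    if pvHd t = pvHd e then rest ++ [[pvHd t, pvSnd e + pvSnd t]]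
    else e :: pvSumA t rest

def Function2 (v : List (List Int)) (views : List (List Int)) : List (List Int) :=
  let v1 := v.foldl (fun v1 row =>
    row.foldl (fun v1 x =>
      views.foldl (fun v1 r =>
        if x = pvHd r then pvSumA (PySem.List.slice r (some 1) none) v1 else v1) v1) v1) []
  PySem.List.sorted2 v1 (fun p => -(pvSnd p)) (fun p => pvHd p)

-- ===== PORT B =====
-- index = {}; for r in views: if r: index.setdefault(r[0], []).append(r[1:])
def pvBuildIndex (views : List (List Int)) : PySem.Dict Int (List (List Int)) :=
  views.foldl (fun d r =>
    if r.isEmpty then d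
    else d.modify (pvHd r) [] (fun l => l ++ [PySem.List.slice r (some 1) none])) PySem.Dict.empty

-- one accumulation step: if t[0] in acc: acc[t[0]] = [t[0], acc[t[0]][1] + t[1]] else acc[t[0]] = t
def pvStepB (d : PySem.Dict Int (List Int)) (t : List Int) : PySem.Dict Int (List Int) :=
  if d.contains (pvHd t) then d.insert (pvHd t) [pvHd t, pvSnd (d.getD (pvHd t) []) + pvSnd t]
  else d.insert (pvHd t) t

def Function2_alt (v : List (List Int)) (views : List (List Int)) : List (List Int) :=
  let index := pvBuildIndex views
  let acc := v.foldl (fun acc row =>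
    row.foldl (fun acc x => (index.getD x []).foldl pvStepB acc) acc) PySem.Dict.empty
  PySem.List.sorted2 acc.values (fun p => -(pvSnd p)) (fun p => pvHd p)

-- ===== PRECONDITION & SPEC =====
-- Exactly the inputs on which the Python A returns: as soon as some element of v exists, every
-- row of views is read at index 0 (so no empty row is allowed), and every row whose key occurs
-- in v must carry a [name, count] tail (length ≥ 3), else an IndexError is raised while merging
-- or while sorting.
def Pre_Function2 (v : List (List Int)) (views : List (List Int)) : Prop :=
  v.flatten = [] ∨ ∀ r ∈ views, r ≠ [] ∧ (r.headD 0 ∈ v.flatten → 3 ≤ r.length)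
instance (v : List (List Int)) (views : List (List Int)) : Decidable (Pre_Function2 v views) := by
  unfold Pre_Function2; infer_instance
def pvWitness_Function2 : List (List Int) × List (List Int) :=
  ([[5, 7]], [[5, 1, 10], [7, 1, 3], [2, 4]])
def Spec_Function2 (v : List (List Int)) (views : List (List Int)) (out : List (List Int)) : Prop := out = Function2_alt v views
instance (v : List (List Int)) (views : List (List Int)) (out : List (List Int)) : Decidable (Spec_Function2 v views out) := by unfold Spec_Function2; infer_instance

-- ===== CLAIM (what is proved, stated in full; the proofs are below) =====
def Claim_equal_Function2 : Prop := ∀ (v : List (List Int)) (views : List (List Int)), Dom_Function2 v views → Pre_Function2 v views → Spec_Function2 v views (Function2 v views)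

-- ===== LEMMAS AND PROOFS =====

-- the sort key, as the lexicographic pair Python compares
def pvKey (p : List Int) : Lex (Int × Int) := toLex (-(pvSnd p), pvHd p)

-- sorted(xs, key=lambda p: (-p[1], p[0])) is sorting by the lexicographic key pvKey
theorem pvSorted2_eq_sorted (xs : List (List Int)) :
    PySem.List.sorted2 xs (fun p => -(pvSnd p)) (fun p => pvHd p) = PySem.List.sorted xs pvKey := by
  have hfun : (fun (a b : List Int) =>
      (decide (-(pvSnd a) < -(pvSnd b)) || (!decide (-(pvSnd b) < -(pvSnd a)) && decide (pvHd a < pvHd b))))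
      = (fun (a b : List Int) => decide (pvKey a < pvKey b)) := by
    funext a b
    have hiff : (pvKey a < pvKey b) ↔ (-(pvSnd a) < -(pvSnd b) ∨ (-(pvSnd a) = -(pvSnd b) ∧ pvHd a < pvHd b)) := by
      simp [pvKey, Prod.Lex.toLex_lt_toLex]
    rcases lt_trichotomy (-(pvSnd a)) (-(pvSnd b)) with h | h | h <;>
      simp [hiff, h] <;> omega
  simp only [PySem.List.sorted2, PySem.List.sorted, hfun]
  rfl

-- the invariant tying A's accumulator list to B's accumulator dict:
-- same entries up to order, unique keys, every entry stored under its own head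
def pvInv (l : List (List Int)) (d : PySem.Dict Int (List Int)) : Prop :=
  l.Perm d.values ∧ d.keys.Nodup ∧ ∀ p ∈ d.items, pvHd p.2 = p.1

theorem pvInv_empty : pvInv [] PySem.Dict.empty := by
  refine ⟨by simp [PySem.Dict.empty, PySem.Dict.values], by simp [PySem.Dict.empty, PySem.Dict.keys], ?_⟩
  simp [PySem.Dict.empty]

theorem pvSumA_no_match (t : List Int) (l : List (List Int))
    (h : ∀ e ∈ l, pvHd e ≠ pvHd t) : pvSumA t l = l ++ [t] := by
  induction l with
  | nil => rfl
  | cons e rest ih =>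
    have hne : pvHd t ≠ pvHd e := fun hh => h e (by simp) hh.symm
    simp [pvSumA, hne, ih (fun e' he' => h e' (by simp [he']))]

theorem pvSumA_unique (t e : List Int) (l : List (List Int)) (he : e ∈ l)
    (hk : pvHd e = pvHd t) (huniq : ∀ e' ∈ l, pvHd e' = pvHd t → e' = e) :
    (pvSumA t l).Perm ([pvHd t, pvSnd e + pvSnd t] :: l.erase e) := by
  induction l with
  | nil => simp at he
  | cons e0 rest ih =>
    by_cases h0 : pvHd t = pvHd e0
    · have he0 : e0 = e := huniq e0 (by simp) h0.symm
      subst he0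
      simp only [pvSumA, if_pos h0, List.erase_cons_head]
      exact List.perm_append_singleton _ _
    · have hne : e0 ≠ e := fun hh => h0 (by rw [hh, hk])
      have he' : e ∈ rest := by
        rcases List.mem_cons.mp he with h | h
        · exact absurd h.symm hne
        · exact h
      have hp := ih he' (fun e' he'' hh => huniq e' (by simp [he'']) hh)
      simp only [pvSumA, if_neg h0]
      have herase : (e0 :: rest).erase e = e0 :: rest.erase e := by
        rw [List.erase_cons_tail]
        simp [hne]
      rw [herase]
      exact (hp.cons e0).trans (List.Perm.swap _ _ _)

theorem pvMap_hd_values (d : PySem.Dict Int (List Int)) (h3 : ∀ p ∈ d.items, pvHd p.2 = p.1) :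
    d.values.map pvHd = d.keys := by
  simp only [PySem.Dict.values, PySem.Dict.keys, List.map_map]
  exact List.map_congr_left (fun p hp => h3 p hp)

theorem pvInv_step (t : List Int) (l : List (List Int)) (d : PySem.Dict Int (List Int))
    (h : pvInv l d) : pvInv (pvSumA t l) (pvStepB d t) := by
  obtain ⟨h1, h2, h3⟩ := h
  by_cases hc : d.contains (pvHd t) = true
  · -- existing key: the unique entry e with head pvHd t is merged
    obtain ⟨e, he⟩ : ∃ e, d.get? (pvHd t) = some e :=
      Option.isSome_iff_exists.mp (by rw [← PySem.Dict.contains_eq_isSome_get?]; exact hc)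
    have hmem : (pvHd t, e) ∈ d.items := (PySem.Dict.get?_eq_some_iff_mem_items d (pvHd t) e h2).mp he
    obtain ⟨i1, i2, hitems⟩ := List.append_of_mem hmem
    have hkeys : d.keys = i1.map Prod.fst ++ pvHd t :: i2.map Prod.fst := by
      simp [PySem.Dict.keys, hitems]
    have hnd := h2
    rw [hkeys, List.nodup_append] at hnd
    obtain ⟨hnd1, hnd2, hdisj⟩ := hnd
    have hni1 : ∀ p ∈ i1, p.1 ≠ pvHd t := by
      intro p hp hpk
      exact hdisj _ (List.mem_map.mpr ⟨p, hp, hpk⟩) _ (List.mem_cons_self) rfl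
    have hni2 : ∀ p ∈ i2, p.1 ≠ pvHd t := by
      intro p hp hpk
      exact (List.nodup_cons.mp hnd2).1 (List.mem_map.mpr ⟨p, hp, hpk⟩)
    have hhd_e : pvHd e = pvHd t := h3 (pvHd t, e) hmem
    have hstep : pvStepB d t = d.insert (pvHd t) [pvHd t, pvSnd e + pvSnd t] := by
      simp only [pvStepB, if_pos hc, PySem.Dict.getD_eq_get?_getD, he, Option.getD_some]
    set nw : List Int := [pvHd t, pvSnd e + pvSnd t] with hnw
    have hitems' : (d.insert (pvHd t) nw).items = i1 ++ (pvHd t, nw) :: i2 := by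
      rw [PySem.Dict.items_insert_of_contains d nw hc, hitems]
      have hmap1 : List.map (fun p => if (p.1 == pvHd t) = true then (pvHd t, nw) else p) i1 = i1 :=
        (List.map_congr_left (g := id) (fun p hp => by simp [hni1 p hp])).trans (List.map_id i1)
      have hmap2 : List.map (fun p => if (p.1 == pvHd t) = true then (pvHd t, nw) else p) i2 = i2 :=
        (List.map_congr_left (g := id) (fun p hp => by simp [hni2 p hp])).trans (List.map_id i2)
      simp only [List.map_append, List.map_cons, beq_self_eq_true, if_pos, hmap1, hmap2]
    have hvals : d.values = i1.map Prod.snd ++ e :: i2.map Prod.snd := by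
      simp [PySem.Dict.values, hitems]
    have hvals' : (d.insert (pvHd t) nw).values = i1.map Prod.snd ++ nw :: i2.map Prod.snd := by
      simp [PySem.Dict.values, hitems']
    -- uniqueness of the matching entry in l
    have huniq : ∀ e' ∈ l, pvHd e' = pvHd t → e' = e := by
      intro e' he' hk'
      have : e' ∈ d.values := h1.mem_iff.mp he'
      rw [hvals] at this
      rcases List.mem_append.mp this with hmm | hmm
      · obtain ⟨p, hp, hpe⟩ := List.mem_map.mp hmm
        have hh : pvHd e' = p.1 := by rw [← hpe]; exact h3 p (by rw [hitems]; simp [hp])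
        exact (hni1 p hp (by rw [← hh, hk'])).elim
      · rcases List.mem_cons.mp hmm with hmm | hmm
        · exact hmm
        · obtain ⟨p, hp, hpe⟩ := List.mem_map.mp hmm
          have hh : pvHd e' = p.1 := by rw [← hpe]; exact h3 p (by rw [hitems]; simp [hp])
          exact (hni2 p hp (by rw [← hh, hk'])).elim
    have hel : e ∈ l := h1.symm.mem_iff.mp (by rw [hvals]; simp)
    have hperm := pvSumA_unique t e l hel hhd_e huniq
    have heni1 : e ∉ i1.map Prod.snd := by
      intro hmm
      obtain ⟨p, hp, hpe⟩ := List.mem_map.mp hmm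
      exact hni1 p hp (by rw [← h3 p (by rw [hitems]; simp [hp]), hpe, hhd_e])
    have herase : d.values.erase e = i1.map Prod.snd ++ i2.map Prod.snd := by
      rw [hvals, List.erase_append_right _ heni1, List.erase_cons_head]
    refine ⟨?_, ?_, ?_⟩
    · rw [hstep, hvals']
      have p1 : (nw :: l.erase e).Perm (nw :: (i1.map Prod.snd ++ i2.map Prod.snd)) :=
        ((h1.erase e).trans (by rw [herase])).cons nw
      exact hperm.trans (p1.trans List.perm_middle.symm)
    · rw [hstep, PySem.Dict.keys_insert_of_contains d nw hc]; exact h2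
    · rw [hstep]
      intro p hp
      rw [hitems'] at hp
      rcases List.mem_append.mp hp with hmm | hmm
      · exact h3 p (by rw [hitems]; simp [hmm])
      · rcases List.mem_cons.mp hmm with hmm | hmm
        · subst hmm; simp [hnw, pvHd, PySem.List.pyGet?, PySem.List.pyIdx?]
        · exact h3 p (by rw [hitems]; simp [hmm])
  · -- fresh key: both sides append the new entry
    have hc' : d.contains (pvHd t) = false := by simpa using hc
    have hstep : pvStepB d t = d.insert (pvHd t) t := by simp [pvStepB, hc']
    have hnk : pvHd t ∉ d.keys := by
      intro hmm
      exact hc (by rw [PySem.Dict.contains_eq_decide_mem_keys]; simpa using hmm)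
    have hnol : ∀ e ∈ l, pvHd e ≠ pvHd t := by
      intro e hel hk
      have hev : e ∈ d.values := h1.mem_iff.mp hel
      have : pvHd e ∈ d.values.map pvHd := List.mem_map_of_mem hev
      rw [pvMap_hd_values d h3] at this
      exact hnk (hk ▸ this)
    rw [pvSumA_no_match t l hnol, hstep]
    refine ⟨?_, ?_, ?_⟩
    · have : (d.insert (pvHd t) t).values = d.values ++ [t] := by
        simp [PySem.Dict.values, PySem.Dict.items_insert_of_not_contains d t hc']
      rw [this]
      exact h1.append (List.Perm.refl [t])
    · exact PySem.Dict.nodup_keys_insert d _ t h2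
    · intro p hp
      rw [PySem.Dict.items_insert_of_not_contains d t hc'] at hp
      rcases List.mem_append.mp hp with hmm | hmm
      · exact h3 p hmm
      · simp at hmm; subst hmm; rfl

theorem pvInv_foldts (ts : List (List Int)) (l : List (List Int)) (d : PySem.Dict Int (List Int))
    (h : pvInv l d) : pvInv (ts.foldl (fun l t => pvSumA t l) l) (ts.foldl pvStepB d) := by
  induction ts generalizing l d with
  | nil => exact h
  | cons t rest ih => exact ih _ _ (pvInv_step t l d h)

theorem pvInv_nested (v : List (List Int)) (F : Int → List (List Int)) (l : List (List Int))
    (d : PySem.Dict Int (List Int)) (h : pvInv l d) :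
    pvInv (v.foldl (fun l row => row.foldl (fun l x => (F x).foldl (fun l t => pvSumA t l) l) l) l)
      (v.foldl (fun d row => row.foldl (fun d x => (F x).foldl pvStepB d) d) d) := by
  induction v generalizing l d with
  | nil => exact h
  | cons row rest ih =>
    simp only [List.foldl_cons]
    apply ih
    clear ih
    induction row generalizing l d with
    | nil => exact h
    | cons x xs ihx =>
      simp only [List.foldl_cons]
      exact ihx _ _ (pvInv_foldts (F x) l d h)

-- A's inner scan of views is the fold over the tails of the matching rows
theorem pvInnerA (views : List (List Int)) (x : Int) (l : List (List Int)) :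
    views.foldl (fun v1 r => if x = pvHd r then pvSumA (PySem.List.slice r (some 1) none) v1 else v1) l
      = ((views.filter (fun r => pvHd r == x)).map (fun r => r.drop 1)).foldl (fun l t => pvSumA t l) l := by
  induction views generalizing l with
  | nil => rfl
  | cons r rest ih =>
    by_cases hx : x = pvHd r
    · have hf : (pvHd r == x) = true := by simp [hx]
      simp only [List.foldl_cons, if_pos hx, List.filter_cons, hf, List.foldl_cons]
      rw [PySem.List.slice_from _ (by norm_num)]
      exact ih _
    · have hf : ¬ ((pvHd r == x) = true) := by simp; exact fun hh => hx hh.symm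
      simp only [List.foldl_cons, if_neg hx, List.filter_cons, if_neg hf]
      exact ih _

-- B's index lookup yields exactly those tails (no empty rows present)
theorem pvGetD_buildIndex (views : List (List Int)) (h : ∀ r ∈ views, r ≠ []) (x : Int) :
    (pvBuildIndex views).getD x []
      = (views.filter (fun r => pvHd r == x)).map (fun r => r.drop 1) := by
  unfold pvBuildIndex
  rw [PySem.List.foldl_congr_mem _ _
      (fun d r => d.modify (pvHd r) [] (fun l => l ++ [r.drop 1])) _
      (by
        intro acc r hr
        have : ¬ r.isEmpty := by simp [List.isEmpty_iff]; exact h r hr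
        simp only [if_neg this]
        rw [PySem.List.slice_from _ (by norm_num)]
        norm_num)]
  have hmap : views.foldl (fun d r => d.modify (pvHd r) [] (fun l => l ++ [r.drop 1])) PySem.Dict.empty
      = (views.map (fun r => (pvHd r, r.drop 1))).foldl (fun d p => d.modify p.1 [] (fun l => l ++ [p.2])) PySem.Dict.empty := by
    rw [List.foldl_map]
  rw [hmap, PySem.Dict.getD_foldl_modify_append]
  simp [List.filter_map, Function.comp_def]

theorem pvSorted_values_eq (l : List (List Int)) (d : PySem.Dict Int (List Int)) (h : pvInv l d) :
    PySem.List.sorted l pvKey = PySem.List.sorted d.values pvKey := by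
  obtain ⟨h1, h2, h3⟩ := h
  have hperm : (PySem.List.sorted d.values pvKey).Perm l :=
    (PySem.List.sorted_perm d.values pvKey false).trans h1.symm
  have hle : (PySem.List.sorted d.values pvKey).Pairwise (fun a b => pvKey a ≤ pvKey b) :=
    PySem.List.sorted_pairwise d.values pvKey
  have hnodup : ((PySem.List.sorted d.values pvKey).map pvHd).Nodup := by
    have hv : (d.values.map pvHd).Nodup := by rw [pvMap_hd_values d h3]; exact h2
    exact ((PySem.List.sorted_perm d.values pvKey false).map pvHd).nodup_iff.mpr hv
  have hne : (PySem.List.sorted d.values pvKey).Pairwise (fun a b => pvHd a ≠ pvHd b) :=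
    List.pairwise_map.mp hnodup
  have hlt : (PySem.List.sorted d.values pvKey).Pairwise (fun a b => pvKey a < pvKey b) := by
    refine (hle.and hne).imp ?_
    rintro a b ⟨hab, hab'⟩
    refine lt_of_le_of_ne hab (fun heq => hab' ?_)
    have heq' : toLex (-(pvSnd a), pvHd a) = toLex (-(pvSnd b), pvHd b) := heq
    exact congrArg Prod.snd (toLex.injective heq')
  exact PySem.List.sorted_eq_of_perm_of_pairwise_lt l _ pvKey hperm hlt

theorem pvFoldl_id_of_nil {β : Type} (v : List (List Int)) (h : ∀ r ∈ v, r = [])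
    (f : β → List Int → β) (hf : ∀ b, f b [] = b) (init : β) : v.foldl f init = init := by
  induction v generalizing init with
  | nil => rfl
  | cons r rest ih =>
    rw [List.foldl_cons, h r (by simp), hf]
    exact ih (fun r' hr' => h r' (by simp [hr'])) init

theorem pvMain (v : List (List Int)) (views : List (List Int)) (hpre : Pre_Function2 v views) :
    Function2 v views = Function2_alt v views := by
  simp only [Function2, Function2_alt, pvSorted2_eq_sorted]
  rcases hpre with hfl | hrows
  · -- no element of v at all: both accumulators stay empty
    have hrows0 : ∀ r ∈ v, r = [] := List.flatten_eq_nil_iff.mp hfl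
    rw [pvFoldl_id_of_nil v hrows0 _ (fun b => rfl), pvFoldl_id_of_nil v hrows0 _ (fun b => rfl)]
    rfl
  · have hne : ∀ r ∈ views, r ≠ [] := fun r hr => (hrows r hr).1
    -- rewrite A's inner scan and B's index lookup to the common fold over matching tails
    rw [PySem.List.foldl_congr_mem v _
      (fun l row => row.foldl (fun l x =>
        (((views.filter (fun r => pvHd r == x)).map (fun r => r.drop 1)).foldl (fun l t => pvSumA t l) l)) l) _
      (by
        intro acc row _
        exact PySem.List.foldl_congr_mem row _ _ acc (fun acc' x _ => pvInnerA views x acc'))]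
    rw [PySem.List.foldl_congr_mem v _
      (fun d row => row.foldl (fun d x =>
        (((views.filter (fun r => pvHd r == x)).map (fun r => r.drop 1)).foldl pvStepB d)) d) _
      (by
        intro acc row _
        exact PySem.List.foldl_congr_mem row _ _ acc
          (fun acc' x _ => by rw [pvGetD_buildIndex views hne x]))]
    exact pvSorted_values_eq _ _ (pvInv_nested v _ [] PySem.Dict.empty pvInv_empty)

-- ===== VERDICT (by name: the statement is the Claim_ definition above) =====
theorem Function2_spec : Claim_equal_Function2 := by
  intro v views _ hpre
  unfold Spec_Function2
  exact pvMain v views hpre
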